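-- pv_equiv track=rewrite | github.com/wiktorwozny/algorithms-and-datastructures | dynamicprogramming/dynamikicwiczenia.py | kloc
-- ===== SOURCE A (Python) =====
-- def kloc(A, i, DP):
--
--     if DP[i] is not None:
--         return DP[i]
--
--     maxval = 0
--     for j in range(i):
--         if A[j][0] <= A[i][0] and A[j][1] >= A[i][1]:
--             maxval = max(maxval, kloc(A, j, DP))
--
--     DP[i] = maxval + 1
--     return DP[i]
-- ===== SOURCE B (Python) =====
-- def kloc(A, i, DP):
--     # Return value only: B does not mutate the memo table DP (A writes into it).
--     if DP[i] is not None: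
--         return DP[i]
--     vals = []
--     for k in range(i + 1):
--         if DP[k] is not None:
--             vals.append(DP[k])
--         else:
--             best = 0
--             for j in range(k):
--                 if A[j][0] <= A[k][0] and A[j][1] >= A[k][1] and vals[j] > best:
--                     best = vals[j]
--             vals.append(best + 1)
--     return vals[i]
-- ===== Notes on version B (the rewrite author's own statement) =====
-- stated objective: alternative
-- what changed: A's top-down memoized recursion that mutates the DP list is replaced by a bottom-up iterative tabulation into a local table (after the usual memo-table read); B never recurses and never mutates DP, so it also avoids Python's recursion-depth limit on long chains.
-- outside the precondition, e.g. on kloc([(1, 1)], -1, [None]): A returns 1, B raises IndexError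
import Mathlib
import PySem

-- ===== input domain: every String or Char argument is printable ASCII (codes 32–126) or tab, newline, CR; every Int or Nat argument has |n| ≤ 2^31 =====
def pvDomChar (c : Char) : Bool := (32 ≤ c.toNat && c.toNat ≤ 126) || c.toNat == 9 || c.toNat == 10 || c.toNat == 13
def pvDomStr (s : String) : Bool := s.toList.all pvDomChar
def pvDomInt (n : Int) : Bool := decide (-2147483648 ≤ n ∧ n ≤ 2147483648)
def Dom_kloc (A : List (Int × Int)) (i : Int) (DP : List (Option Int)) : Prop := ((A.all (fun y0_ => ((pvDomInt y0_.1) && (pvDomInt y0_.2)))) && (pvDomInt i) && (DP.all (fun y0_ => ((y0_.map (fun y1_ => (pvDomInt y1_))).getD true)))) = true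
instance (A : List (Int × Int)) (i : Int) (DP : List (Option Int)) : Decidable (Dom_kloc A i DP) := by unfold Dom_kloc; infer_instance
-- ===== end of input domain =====

-- B replaces A's top-down memoized recursion (which mutates DP) by a bottom-up tabulation
-- into a local table; equivalence is about the RETURN value only (B does not mutate DP).

-- the dominance test A[j][0] <= A[k][0] and A[j][1] >= A[k][1], shared by both ports
def pvCond (Arr : List (Int × Int)) (j k : Nat) : Bool :=
  decide ((Arr.getD j (0, 0)).1 ≤ (Arr.getD k (0, 0)).1) &&
    decide ((Arr.getD j (0, 0)).2 ≥ (Arr.getD k (0, 0)).2)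

-- ===== PORT A =====
-- kloc's body on a nonnegative index: memo check, then the j-loop threading the mutated DP
mutual
def klocRec (Arr : List (Int × Int)) (i : Nat) (DP : List (Option Int)) :
    Int × List (Option Int) :=
  match DP.getD i none with
  | some v => (v, DP)
  | none =>
    let st := klocLoop Arr i 0 0 DP
    (st.1 + 1, st.2.set i (some (st.1 + 1)))
termination_by (i + 1, 0)
decreasing_by all_goals (simp [Prod.lex_iff]; try omega)

def klocLoop (Arr : List (Int × Int)) (i j : Nat) (maxval : Int) (DP : List (Option Int)) :
    Int × List (Option Int) :=
  if j < i then
    if pvCond Arr j i then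
      let r := klocRec Arr j DP
      klocLoop Arr i (j + 1) (max maxval r.1) r.2
    else klocLoop Arr i (j + 1) maxval DP
  else (maxval, DP)
termination_by (i, i + 1 - j)
decreasing_by all_goals (simp [Prod.lex_iff]; try omega)
end

def kloc (A : List (Int × Int)) (i : Int) (DP : List (Option Int)) : Int :=
  match PySem.List.pyGet? DP i with
  | some (some v) => v                 -- if DP[i] is not None: return DP[i]
  | _ => (klocRec A i.toNat DP).1      -- else the recursive body (out-of-range i excluded by Pre_)

-- ===== PORT B =====
-- inner loop of B: best = running max of vals[j] over dominating j < k
def bestLoop (Arr : List (Int × Int)) (vals : List Int) (k j : Nat) (best : Int) : Int :=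
  if j < k then
    bestLoop Arr vals k (j + 1)
      (if pvCond Arr j k && decide (vals.getD j 0 > best) then vals.getD j 0 else best)
  else best
termination_by k - j

-- outer loop of B: build the table vals for k = 0 .. n-1
def tabLoop (Arr : List (Int × Int)) (DP : List (Option Int)) (n k : Nat) (vals : List Int) :
    List Int :=
  if k < n then
    match DP.getD k none with
    | some v => tabLoop Arr DP n (k + 1) (vals ++ [v])
    | none => tabLoop Arr DP n (k + 1) (vals ++ [bestLoop Arr vals k 0 0 + 1])
  else vals
termination_by n - k

def kloc_alt (A : List (Int × Int)) (i : Int) (DP : List (Option Int)) : Int :=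
  match PySem.List.pyGet? DP i with
  | some (some v) => v                 -- if DP[i] is not None: return DP[i]
  | some none =>                       -- tabulate vals[0..i], return vals[i]
    (tabLoop A DP (i.toNat + 1) 0 []).getD i.toNat 0
  | none =>                            -- DP[i] raises IndexError in Python: excluded by Pre_
    (tabLoop A DP (i.toNat + 1) 0 []).getD i.toNat 0

-- ===== PRECONDITION & SPEC =====
-- Pre_ excludes inputs where DP[i] raises IndexError (A raises), and negative i whose wrapped
-- memo entry is unset: there A's empty loop range(i) returns 1 by negative-index wraparound
-- while B's tabulation raises IndexError; likewise i ≥ 1 with DP[i] unset and i ≥ len(A),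
-- where A raises IndexError on A[i].
def Pre_kloc (A : List (Int × Int)) (i : Int) (DP : List (Option Int)) : Prop :=
  PySem.List.pyGet? DP i ≠ none ∧
    (PySem.List.pyGet? DP i = some none → 0 ≤ i ∧ (i = 0 ∨ i.toNat < A.length))
instance (A : List (Int × Int)) (i : Int) (DP : List (Option Int)) : Decidable (Pre_kloc A i DP) := by
  unfold Pre_kloc; infer_instance

def pvWitness_kloc : (List (Int × Int)) × Int × List (Option Int) :=
  ([(1, 2), (2, 1), (3, 1)], 2, [none, none, none])

def Spec_kloc (A : List (Int × Int)) (i : Int) (DP : List (Option Int)) (out : Int) : Prop := out = kloc_alt A i DP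
instance (A : List (Int × Int)) (i : Int) (DP : List (Option Int)) (out : Int) : Decidable (Spec_kloc A i DP out) := by unfold Spec_kloc; infer_instance

-- ===== CLAIM (what is proved, stated in full; the proofs are below) =====
def Claim_equal_kloc : Prop := ∀ (A : List (Int × Int)) (i : Int) (DP : List (Option Int)), Dom_kloc A i DP → Pre_kloc A i DP → Spec_kloc A i DP (kloc A i DP)

-- ===== LEMMAS AND PROOFS =====

-- the common value function: entry k of the completed table, relative to the pristine DP0
mutual
def fval (Arr : List (Int × Int)) (DP0 : List (Option Int)) (k : Nat) : Int :=
  match DP0.getD k none with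
  | some v => v
  | none => floop Arr DP0 k 0 0 + 1
termination_by (k + 1, 0)
decreasing_by all_goals (simp [Prod.lex_iff]; try omega)

def floop (Arr : List (Int × Int)) (DP0 : List (Option Int)) (k j : Nat) (best : Int) : Int :=
  if j < k then
    floop Arr DP0 k (j + 1) (if pvCond Arr j k then max best (fval Arr DP0 j) else best)
  else best
termination_by (k, k + 1 - j)
decreasing_by all_goals (simp [Prod.lex_iff]; try omega)
end

-- coherence of a partially filled memo table with the pristine DP0
def Coh (Arr : List (Int × Int)) (DP0 DP : List (Option Int)) : Prop :=
  DP.length = DP0.length ∧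
    ∀ k, DP.getD k none = DP0.getD k none ∨
      (DP0.getD k none = none ∧ DP.getD k none = some (fval Arr DP0 k))

lemma getD_set_ne' {α : Type} (l : List α) (i k : Nat) (x d : α) (h : k ≠ i) :
    (l.set i x).getD k d = l.getD k d := by
  simp [List.getD_eq_getElem?_getD, List.getElem?_set_ne (show i ≠ k by omega)]

lemma getD_set_self' {α : Type} (l : List α) (i : Nat) (x d : α) (h : i < l.length) :
    (l.set i x).getD i d = x := by
  simp [List.getD_eq_getElem?_getD, List.getElem?_set_self h]

lemma Coh.refl (Arr : List (Int × Int)) (DP0 : List (Option Int)) : Coh Arr DP0 DP0 :=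
  ⟨rfl, fun _ => Or.inl rfl⟩

lemma klocLoop_eq_floop (Arr : List (Int × Int)) (DP0 : List (Option Int)) (i : Nat)
    (IH : ∀ j, j < i → ∀ DP, Coh Arr DP0 DP →
      (klocRec Arr j DP).1 = fval Arr DP0 j ∧ Coh Arr DP0 (klocRec Arr j DP).2) :
    ∀ (fuel j : Nat) (maxval : Int) (DP : List (Option Int)), i - j ≤ fuel → Coh Arr DP0 DP →
      (klocLoop Arr i j maxval DP).1 = floop Arr DP0 i j maxval ∧
        Coh Arr DP0 (klocLoop Arr i j maxval DP).2 := by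
  intro fuel
  induction fuel with
  | zero =>
    intro j maxval DP hf hCoh
    have hj : ¬ j < i := by omega
    unfold klocLoop floop
    simp [hj]
    exact hCoh
  | succ fuel ih =>
    intro j maxval DP hf hCoh
    by_cases hj : j < i
    · unfold klocLoop floop
      simp only [hj, if_pos]
      by_cases hc : pvCond Arr j i = true
      · obtain ⟨h1, h2⟩ := IH j hj DP hCoh
        simp only [hc, if_pos]
        rw [h1]
        exact ih (j + 1) (max maxval (fval Arr DP0 j)) (klocRec Arr j DP).2 (by omega) h2
      · simp only [Bool.not_eq_true] at hc
        simp only [hc, Bool.false_eq_true, if_false]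
        exact ih (j + 1) maxval DP (by omega) hCoh
    · unfold klocLoop floop
      simp [hj]
      exact hCoh

lemma klocRec_eq_fval (Arr : List (Int × Int)) (DP0 : List (Option Int)) :
    ∀ (i : Nat) (DP : List (Option Int)), Coh Arr DP0 DP →
      (klocRec Arr i DP).1 = fval Arr DP0 i ∧ Coh Arr DP0 (klocRec Arr i DP).2 := by
  intro i
  induction i using Nat.strongRecOn with
  | ind i IH =>
    intro DP hCoh
    rcases h : DP.getD i none with _ | v
    · -- memo entry unset: run the loop
      have h0 : DP0.getD i none = none := by
        rcases hCoh.2 i with he | ⟨_, h2⟩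
        · rw [← he, h]
        · rw [h] at h2; exact absurd h2 (by simp)
      have hfv : fval Arr DP0 i = floop Arr DP0 i 0 0 + 1 := by
        unfold fval; rw [h0]
      have hloop := klocLoop_eq_floop Arr DP0 i (fun j hj DP' hC => IH j hj DP' hC)
        i 0 0 DP (by omega) hCoh
      unfold klocRec
      rw [h]
      obtain ⟨hl1, hl2⟩ := hloop
      obtain ⟨hlen, hall⟩ := hl2
      constructor
      · show (klocLoop Arr i 0 0 DP).1 + 1 = fval Arr DP0 i
        rw [hfv, hl1]
      · show Coh Arr DP0 ((klocLoop Arr i 0 0 DP).2.set i (some ((klocLoop Arr i 0 0 DP).1 + 1)))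
        refine ⟨by simp [hlen], ?_⟩
        intro k
        by_cases hk : k = i
        · rw [hk]
          by_cases hlt : i < (klocLoop Arr i 0 0 DP).2.length
          · right
            refine ⟨h0, ?_⟩
            rw [getD_set_self' _ _ _ _ hlt, hl1, ← hfv]
          · rw [List.set_eq_of_length_le (by omega)]
            exact hall i
        · rw [getD_set_ne' _ _ _ _ _ hk]
          exact hall k
    · -- memoized: return the stored value
      have hv : v = fval Arr DP0 i := by
        rcases hCoh.2 i with he | ⟨h1, h2⟩
        · rw [h] at he
          unfold fval; rw [← he]
        · rw [h] at h2
          exact Option.some_injective _ h2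
      unfold klocRec
      rw [h]
      exact ⟨hv, hCoh⟩

lemma bestLoop_eq_floop (Arr : List (Int × Int)) (DP0 : List (Option Int)) (k : Nat) :
    ∀ (fuel j : Nat) (best : Int), k - j ≤ fuel →
      bestLoop Arr ((List.range k).map (fval Arr DP0)) k j best = floop Arr DP0 k j best := by
  intro fuel
  induction fuel with
  | zero =>
    intro j best hf
    have hj : ¬ j < k := by omega
    unfold bestLoop floop
    simp [hj]
  | succ fuel ih =>
    intro j best hf
    by_cases hj : j < k
    · unfold bestLoop floop
      simp only [hj, if_pos]
      have hv : ((List.range k).map (fval Arr DP0)).getD j 0 = fval Arr DP0 j := by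
        rw [List.getD_eq_getElem?_getD, List.getElem?_map, List.getElem?_range hj]
        rfl
      rw [hv]
      have hacc : (if pvCond Arr j k && decide (fval Arr DP0 j > best)
            then fval Arr DP0 j else best) =
          (if pvCond Arr j k then max best (fval Arr DP0 j) else best) := by
        by_cases hc : pvCond Arr j k = true
        · by_cases hgt : fval Arr DP0 j > best
          · simp [hc, hgt, max_eq_right (le_of_lt hgt)]
          · simp [hc, hgt, max_eq_left (not_lt.mp hgt)]
        · simp only [Bool.not_eq_true] at hc
          simp [hc]
      rw [hacc]
      exact ih (j + 1) _ (by omega)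
    · unfold bestLoop floop
      simp [hj]

lemma tabLoop_eq_map (Arr : List (Int × Int)) (DP0 : List (Option Int)) (n : Nat) :
    ∀ (fuel k : Nat), n - k ≤ fuel → k ≤ n →
      tabLoop Arr DP0 n k ((List.range k).map (fval Arr DP0)) =
        (List.range n).map (fval Arr DP0) := by
  intro fuel
  induction fuel with
  | zero =>
    intro k hf hk
    have hkn : k = n := by omega
    unfold tabLoop
    simp [hkn]
  | succ fuel ih =>
    intro k hf hk
    by_cases hlt : k < n
    · unfold tabLoop
      simp only [hlt, if_pos]
      have hstep : ∀ x : Int, x = fval Arr DP0 k →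
          (List.range k).map (fval Arr DP0) ++ [x] =
            (List.range (k + 1)).map (fval Arr DP0) := by
        intro x hx
        rw [List.range_succ, List.map_append, hx]
        rfl
      rcases h : DP0.getD k none with _ | v
      · dsimp only
        rw [hstep (bestLoop Arr ((List.range k).map (fval Arr DP0)) k 0 0 + 1)
            (by rw [bestLoop_eq_floop Arr DP0 k k 0 0 (by omega)]
                unfold fval
                rw [h])]
        exact ih (k + 1) (by omega) (by omega)
      · dsimp only
        rw [hstep v (by unfold fval; rw [h])]
        exact ih (k + 1) (by omega) (by omega)
    · have hkn : k = n := by omega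
      unfold tabLoop
      simp [hkn]

-- ===== VERDICT (by name: the statement is the Claim_ definition above) =====
theorem kloc_spec : Claim_equal_kloc := by
  intro A i DP _ hPre
  unfold Spec_kloc
  rcases h : PySem.List.pyGet? DP i with _ | ov
  · exact absurd h hPre.1
  · rcases ov with _ | v
    · -- DP[i] is None: A runs its memoized recursion, B tabulates
      have hA : kloc A i DP = (klocRec A i.toNat DP).1 := by
        unfold kloc; rw [h]
      have hB : kloc_alt A i DP = (tabLoop A DP (i.toNat + 1) 0 []).getD i.toNat 0 := by
        unfold kloc_alt; rw [h]
      rw [hA, hB]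
      have htab : tabLoop A DP (i.toNat + 1) 0 [] =
          (List.range (i.toNat + 1)).map (fval A DP) := by
        have := tabLoop_eq_map A DP (i.toNat + 1) (i.toNat + 1) 0 (by omega) (by omega)
        simpa using this
      rw [htab]
      have hget : ((List.range (i.toNat + 1)).map (fval A DP)).getD i.toNat 0 =
          fval A DP i.toNat := by
        rw [List.getD_eq_getElem?_getD, List.getElem?_map, List.getElem?_range (by omega)]
        rfl
      rw [hget]
      exact (klocRec_eq_fval A DP i.toNat DP (Coh.refl A DP)).1
    · -- DP[i] is set: both return it
      have hA : kloc A i DP = v := by unfold kloc; rw [h]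
      have hB : kloc_alt A i DP = v := by unfold kloc_alt; rw [h]
      rw [hA, hB]
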